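-- pv_equiv track=rewrite | github.com/saishagoel27/scribbly | flashcards.py | _organize_flashcards_by_type
-- ===== SOURCE A (Python) =====
-- from typing import Dict, List, Optional, Tuple, Callable
--
-- def _organize_flashcards_by_type(flashcards: List[Dict]) -> Dict[str, List[Dict]]:
--     """Organize flashcards by type for the final result"""
--     organized = {
--         "definition": [],
--         "conceptual": [],
--         "application": [],
--         "detail": []
--     }
--
--     for card in flashcards:
--         card_type = card.get("type", "definition")
--         if card_type in organized:
--             organized[card_type].append(card)
--         else:
--             organized["definition"].append(card)  # Default fallback
--
--     # Remove empty categories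
--     return {k: v for k, v in organized.items() if v}
-- ===== SOURCE B (Python) =====
-- CATEGORIES = ["definition", "conceptual", "application", "detail"]
--
-- def _category_of(card):
--     """The category a card belongs to; unknown or missing types count as definitions."""
--     card_type = card.get("type", "definition")
--     return card_type if card_type in CATEGORIES else "definition"
--
-- def _organize_flashcards_by_type(flashcards):
--     """Organize flashcards by type for the final result"""
--     result = {}
--     for category in CATEGORIES:
--         bucket = [card for card in flashcards if _category_of(card) == category]
--         if bucket:
--             result[category] = bucket
--     return result
-- ===== Notes on version B (the rewrite author's own statement) =====
-- stated objective: alternative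
-- what changed: Replaces A's single dispatching pass into a pre-seeded four-bucket dict (followed by an empty-bucket filter) with one filter scan per fixed category using a named category-resolution helper, appending each non-empty bucket directly to the result.
import Mathlib
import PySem

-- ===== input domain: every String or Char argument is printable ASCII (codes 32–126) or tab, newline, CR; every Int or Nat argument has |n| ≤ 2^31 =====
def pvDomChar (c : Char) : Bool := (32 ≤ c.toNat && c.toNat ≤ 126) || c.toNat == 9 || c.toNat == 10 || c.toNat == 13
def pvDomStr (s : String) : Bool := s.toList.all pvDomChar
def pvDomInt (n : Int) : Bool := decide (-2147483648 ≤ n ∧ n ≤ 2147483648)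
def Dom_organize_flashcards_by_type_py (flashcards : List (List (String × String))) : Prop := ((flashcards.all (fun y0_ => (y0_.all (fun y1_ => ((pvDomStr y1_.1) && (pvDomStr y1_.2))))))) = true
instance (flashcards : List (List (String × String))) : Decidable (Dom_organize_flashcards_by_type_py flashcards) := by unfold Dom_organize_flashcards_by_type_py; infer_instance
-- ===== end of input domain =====

-- B replaces A's single dispatching pass into a pre-seeded four-bucket dict with one filter scan per fixed category via a named category-resolution helper (alternative decomposition, same cost class).

-- ===== PORT A =====
def organize_flashcards_by_type_py (flashcards : List (List (String × String))) : List (String × List (List (String × String))) :=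
  let organized : PySem.Dict String (List (List (String × String))) :=
    PySem.Dict.mk [("definition", []), ("conceptual", []), ("application", []), ("detail", [])]
  let organized := flashcards.foldl (fun org card =>
    let card_type := (PySem.Dict.mk card).getD "type" "definition"
    if org.contains card_type then
      org.modify card_type [] (fun v => v ++ [card])
    else
      org.modify "definition" [] (fun v => v ++ [card])) organized
  organized.items.filter (fun kv => !kv.2.isEmpty)

-- ===== PORT B =====
-- Source B's module constant CATEGORIES
def pvCATEGORIES : List String := ["definition", "conceptual", "application", "detail"]

-- Source B's helper _category_of
def pvCategoryOf (card : List (String × String)) : String :=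
  let card_type := (PySem.Dict.mk card).getD "type" "definition"
  if pvCATEGORIES.contains card_type then card_type else "definition"

def organize_flashcards_by_type_py_alt (flashcards : List (List (String × String))) : List (String × List (List (String × String))) :=
  pvCATEGORIES.foldl (fun res category =>
    let bucket := flashcards.filter (fun card => pvCategoryOf card == category)
    if bucket.isEmpty then res else res ++ [(category, bucket)]) []

-- ===== PRECONDITION & SPEC =====
def Spec_organize_flashcards_by_type_py (flashcards : List (List (String × String))) (out : List (String × List (List (String × String)))) : Prop := out = organize_flashcards_by_type_py_alt flashcards
instance (flashcards : List (List (String × String))) (out : List (String × List (List (String × String)))) : Decidable (Spec_organize_flashcards_by_type_py flashcards out) := by unfold Spec_organize_flashcards_by_type_py; infer_instance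

-- ===== CLAIM (what is proved, stated in full; the proofs are below) =====
def Claim_equal_organize_flashcards_by_type_py : Prop := ∀ (flashcards : List (List (String × String))), Dom_organize_flashcards_by_type_py flashcards → Spec_organize_flashcards_by_type_py flashcards (organize_flashcards_by_type_py flashcards)

-- ===== LEMMAS AND PROOFS =====

-- the resolved type of a card (the value both programs bucket by)
def pvResolve (card : List (String × String)) : String :=
  let t := (PySem.Dict.mk card).getD "type" "definition"
  if t = "definition" ∨ t = "conceptual" ∨ t = "application" ∨ t = "detail" then t else "definition"

-- the four-bucket state A's loop maintains
def pvD (d1 d2 d3 d4 : List (List (String × String))) : PySem.Dict String (List (List (String × String))) :=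
  PySem.Dict.mk [("definition", d1), ("conceptual", d2), ("application", d3), ("detail", d4)]

-- one iteration of A's loop body, for an abstract type string t
theorem pvStepGen (card : List (String × String)) (t : String) (d1 d2 d3 d4 : List (List (String × String))) :
    (if (pvD d1 d2 d3 d4).contains t = true
     then (pvD d1 d2 d3 d4).modify t [] (fun v => v ++ [card])
     else (pvD d1 d2 d3 d4).modify "definition" [] (fun v => v ++ [card]))
    = pvD (if (if t = "definition" ∨ t = "conceptual" ∨ t = "application" ∨ t = "detail" then t else "definition") == "definition" then d1 ++ [card] else d1)
          (if (if t = "definition" ∨ t = "conceptual" ∨ t = "application" ∨ t = "detail" then t else "definition") == "conceptual" then d2 ++ [card] else d2)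
          (if (if t = "definition" ∨ t = "conceptual" ∨ t = "application" ∨ t = "detail" then t else "definition") == "application" then d3 ++ [card] else d3)
          (if (if t = "definition" ∨ t = "conceptual" ∨ t = "application" ∨ t = "detail" then t else "definition") == "detail" then d4 ++ [card] else d4) := by
  by_cases h1 : t = "definition"
  · subst h1
    apply PySem.Dict.ext
    simp [pvD, PySem.Dict.contains, PySem.Dict.modify, PySem.Dict.getD, PySem.Dict.get?,
      PySem.Dict.items_insert]
  · by_cases h2 : t = "conceptual"
    · subst h2
      apply PySem.Dict.ext
      simp [pvD, PySem.Dict.contains, PySem.Dict.modify, PySem.Dict.getD, PySem.Dict.get?,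
        PySem.Dict.items_insert]
    · by_cases h3 : t = "application"
      · subst h3
        apply PySem.Dict.ext
        simp [pvD, PySem.Dict.contains, PySem.Dict.modify, PySem.Dict.getD, PySem.Dict.get?,
          PySem.Dict.items_insert]
      · by_cases h4 : t = "detail"
        · subst h4
          apply PySem.Dict.ext
          simp [pvD, PySem.Dict.contains, PySem.Dict.modify, PySem.Dict.getD, PySem.Dict.get?,
            PySem.Dict.items_insert]
        · have h1' : ¬ ("definition" = t) := fun h => h1 h.symm
          have h2' : ¬ ("conceptual" = t) := fun h => h2 h.symm
          have h3' : ¬ ("application" = t) := fun h => h3 h.symm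
          have h4' : ¬ ("detail" = t) := fun h => h4 h.symm
          apply PySem.Dict.ext
          simp [pvD, PySem.Dict.contains, PySem.Dict.modify, PySem.Dict.getD, PySem.Dict.get?,
            PySem.Dict.items_insert, h1, h2, h3, h4, h1', h2', h3', h4']

-- one iteration of A's loop appends the card to the bucket of its resolved type
theorem pvStep (card : List (String × String)) (d1 d2 d3 d4 : List (List (String × String))) :
    (if (pvD d1 d2 d3 d4).contains ((PySem.Dict.mk card).getD "type" "definition") = true
     then (pvD d1 d2 d3 d4).modify ((PySem.Dict.mk card).getD "type" "definition") [] (fun v => v ++ [card])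
     else (pvD d1 d2 d3 d4).modify "definition" [] (fun v => v ++ [card]))
    = pvD (if pvResolve card == "definition" then d1 ++ [card] else d1)
          (if pvResolve card == "conceptual" then d2 ++ [card] else d2)
          (if pvResolve card == "application" then d3 ++ [card] else d3)
          (if pvResolve card == "detail" then d4 ++ [card] else d4) := by
  simpa only [pvResolve] using
    pvStepGen card ((PySem.Dict.mk card).getD "type" "definition") d1 d2 d3 d4

-- A's loop from buckets d1..d4 appends to each bucket exactly the cards resolving to its key
theorem pvLoopA (xs : List (List (String × String)))
    (d1 d2 d3 d4 : List (List (String × String))) :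
    xs.foldl (fun org card =>
      if org.contains ((PySem.Dict.mk card).getD "type" "definition") = true then
        org.modify ((PySem.Dict.mk card).getD "type" "definition") [] (fun v => v ++ [card])
      else
        org.modify "definition" [] (fun v => v ++ [card]))
      (pvD d1 d2 d3 d4) =
    pvD (d1 ++ xs.filter (fun c => pvResolve c == "definition"))
        (d2 ++ xs.filter (fun c => pvResolve c == "conceptual"))
        (d3 ++ xs.filter (fun c => pvResolve c == "application"))
        (d4 ++ xs.filter (fun c => pvResolve c == "detail")) := by
  induction xs generalizing d1 d2 d3 d4 with
  | nil => simp
  | cons c cs ih =>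
    rw [List.foldl_cons]
    show cs.foldl _ (if (pvD d1 d2 d3 d4).contains ((PySem.Dict.mk c).getD "type" "definition") = true
     then (pvD d1 d2 d3 d4).modify ((PySem.Dict.mk c).getD "type" "definition") [] (fun v => v ++ [c])
     else (pvD d1 d2 d3 d4).modify "definition" [] (fun v => v ++ [c])) = _
    rw [pvStep, ih]
    simp only [pvD, PySem.Dict.mk.injEq, List.filter_cons]
    split_ifs <;> simp_all

-- B's per-category filter predicate is pvResolve-equality
theorem pvPredB (category : String) (card : List (String × String)) :
    (pvCategoryOf card == category) = (pvResolve card == category) := by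
  simp only [pvCategoryOf, pvCATEGORIES, pvResolve, List.contains_cons, List.contains_nil]
  split_ifs with h h' h' <;> simp_all

-- ===== VERDICT (by name: the statement is the Claim_ definition above) =====
theorem organize_flashcards_by_type_py_spec : Claim_equal_organize_flashcards_by_type_py := by
  intro flashcards _
  show organize_flashcards_by_type_py flashcards = organize_flashcards_by_type_py_alt flashcards
  unfold organize_flashcards_by_type_py organize_flashcards_by_type_py_alt
  dsimp only
  rw [show ({ items := [("definition", []), ("conceptual", []), ("application", []), ("detail", [])] } :
        PySem.Dict String (List (List (String × String)))) = pvD [] [] [] [] from rfl, pvLoopA]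
  simp only [pvCATEGORIES, List.foldl_cons, List.foldl_nil, pvPredB, pvD, List.nil_append,
    List.filter_cons, List.filter_nil]
  split_ifs <;> simp_all
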